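-- pv_equiv track=rewrite | github.com/AshrafOmara12/Python-Problem-Solving | min sum.py | MinSum
-- ===== SOURCE A (Python) =====
-- def MinSum(arr,n):
--     arr = sorted(arr)
--     num1=0
--     num2=0
--     for i in range(n):
--         if i%2==0:
--             num1=num1*10+arr[i]
--         else:
--             num2=num2 *10 +arr[i]
--     return num1+num2
-- ===== SOURCE B (Python) =====
-- def MinSum(arr, n):
--     arr = sorted(arr)
--     total = 0
--     for i in range(n):
--         total += arr[i] * 10 ** ((n - 1 - i) // 2)
--     return total
-- ===== Notes on version B (the rewrite author's own statement) =====
-- stated objective: alternative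
-- what changed: Replaces A's two alternating digit-building accumulators (num1/num2 with a parity branch, then summed) by a single pass that adds each sorted digit times its place value 10**((n-1-i)//2), with no parity branch and one accumulator.
import Mathlib
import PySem

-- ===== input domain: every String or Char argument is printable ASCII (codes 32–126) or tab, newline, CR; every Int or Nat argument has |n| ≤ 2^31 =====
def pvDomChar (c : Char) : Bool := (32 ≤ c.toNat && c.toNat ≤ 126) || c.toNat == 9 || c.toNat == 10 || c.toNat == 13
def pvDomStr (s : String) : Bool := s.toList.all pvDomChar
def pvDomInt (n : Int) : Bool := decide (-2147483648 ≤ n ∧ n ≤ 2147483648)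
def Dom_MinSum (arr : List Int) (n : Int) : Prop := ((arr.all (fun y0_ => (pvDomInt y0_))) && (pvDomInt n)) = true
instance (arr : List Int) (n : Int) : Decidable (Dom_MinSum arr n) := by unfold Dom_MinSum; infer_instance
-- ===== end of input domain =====

-- B replaces A's two alternating accumulators by a single weighted place-value sum
-- (arr[i] * 10^((n-1-i)//2)); objective: alternative decomposition, same cost.

-- ===== PORT A =====
-- literal port of A: sort, then fold over range(n) with the pair (num1, num2);
-- arr[i] is read with pyGetD (in range on Pre_, which excludes A's IndexError).
def MinSum (arr : List Int) (n : Int) : Int :=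
  let s := PySem.List.sorted arr (fun x => x) false
  let p := (PySem.List.pyRange 0 n 1).foldl
    (fun (p : Int × Int) i =>
      if PySem.Int.mod i 2 = 0 then (p.1 * 10 + PySem.List.pyGetD s i 0, p.2)
      else (p.1, p.2 * 10 + PySem.List.pyGetD s i 0)) (0, 0)
  p.1 + p.2

-- ===== PORT B =====
-- literal port of Source B: sort, then one accumulator total += arr[i] * 10 ** ((n-1-i)//2);
-- the exponent is ≥ 0 for every i in range(n), so .toNat is exact.
def MinSum_alt (arr : List Int) (n : Int) : Int :=
  let s := PySem.List.sorted arr (fun x => x) false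
  (PySem.List.pyRange 0 n 1).foldl
    (fun (total : Int) i =>
      total + PySem.List.pyGetD s i 0 * 10 ^ (PySem.Int.floordiv (n - 1 - i) 2).toNat) 0

-- ===== PRECONDITION & SPEC =====
-- Pre_ excludes n > len(arr), where both Pythons raise IndexError at arr[i].
def Pre_MinSum (arr : List Int) (n : Int) : Prop := n ≤ (arr.length : Int)
instance (arr : List Int) (n : Int) : Decidable (Pre_MinSum arr n) := by unfold Pre_MinSum; infer_instance
def pvWitness_MinSum : List Int × Int := ([3, 1, 2, 4], 4)

def Spec_MinSum (arr : List Int) (n : Int) (out : Int) : Prop := out = MinSum_alt arr n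
instance (arr : List Int) (n : Int) (out : Int) : Decidable (Spec_MinSum arr n out) := by unfold Spec_MinSum; infer_instance

-- ===== CLAIM (what is proved, stated in full; the proofs are below) =====
def Claim_equal_MinSum : Prop := ∀ (arr : List Int) (n : Int), Dom_MinSum arr n → Pre_MinSum arr n → Spec_MinSum arr n (MinSum arr n)

-- ===== LEMMAS AND PROOFS =====

-- A's step, expressed over Nat indices
def pvStepA (s : List Int) (p : Int × Int) (i : Nat) : Int × Int :=
  if i % 2 = 0 then (p.1 * 10 + s.getD i 0, p.2) else (p.1, p.2 * 10 + s.getD i 0)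

-- the closed parity sums A's accumulators hold after k steps
def pvEven (s : List Int) (k : Nat) : Int :=
  ((List.range k).map (fun i => if i % 2 = 0 then s.getD i 0 * 10 ^ ((k - 1 - i) / 2) else 0)).sum
def pvOdd (s : List Int) (k : Nat) : Int :=
  ((List.range k).map (fun i => if i % 2 = 1 then s.getD i 0 * 10 ^ ((k - 1 - i) / 2) else 0)).sum

lemma pvEven_succ_even (s : List Int) (k : Nat) (hk : k % 2 = 0) :
    pvEven s (k + 1) = pvEven s k * 10 + s.getD k 0 := by
  unfold pvEven
  rw [List.range_succ, List.map_append, List.sum_append]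
  have h1 : (List.range k).map (fun i => if i % 2 = 0 then s.getD i 0 * 10 ^ ((k + 1 - 1 - i) / 2) else 0)
      = (List.range k).map (fun i => (if i % 2 = 0 then s.getD i 0 * 10 ^ ((k - 1 - i) / 2) else 0) * 10) := by
    apply List.map_congr_left
    intro i hi
    have hik : i < k := List.mem_range.mp hi
    by_cases h : i % 2 = 0
    · have h2 : (k + 1 - 1 - i) / 2 = (k - 1 - i) / 2 + 1 := by omega
      rw [if_pos h, if_pos h, h2, pow_succ]; ring
    · simp [h]
  rw [h1, List.sum_map_mul_right]
  simp [hk]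

lemma pvOdd_succ_even (s : List Int) (k : Nat) (hk : k % 2 = 0) :
    pvOdd s (k + 1) = pvOdd s k := by
  unfold pvOdd
  rw [List.range_succ, List.map_append, List.sum_append]
  have h1 : (List.range k).map (fun i => if i % 2 = 1 then s.getD i 0 * 10 ^ ((k + 1 - 1 - i) / 2) else 0)
      = (List.range k).map (fun i => if i % 2 = 1 then s.getD i 0 * 10 ^ ((k - 1 - i) / 2) else 0) := by
    apply List.map_congr_left
    intro i hi
    have hik : i < k := List.mem_range.mp hi
    by_cases h : i % 2 = 1
    · have h2 : (k + 1 - 1 - i) / 2 = (k - 1 - i) / 2 := by omega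
      rw [if_pos h, if_pos h, h2]
    · simp [h]
  rw [h1]
  simp [hk]

lemma pvEven_succ_odd (s : List Int) (k : Nat) (hk : k % 2 = 1) :
    pvEven s (k + 1) = pvEven s k := by
  unfold pvEven
  rw [List.range_succ, List.map_append, List.sum_append]
  have h1 : (List.range k).map (fun i => if i % 2 = 0 then s.getD i 0 * 10 ^ ((k + 1 - 1 - i) / 2) else 0)
      = (List.range k).map (fun i => if i % 2 = 0 then s.getD i 0 * 10 ^ ((k - 1 - i) / 2) else 0) := by
    apply List.map_congr_left
    intro i hi
    have hik : i < k := List.mem_range.mp hi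
    by_cases h : i % 2 = 0
    · have h2 : (k + 1 - 1 - i) / 2 = (k - 1 - i) / 2 := by omega
      rw [if_pos h, if_pos h, h2]
    · simp [h]
  rw [h1]
  simp [hk]

lemma pvOdd_succ_odd (s : List Int) (k : Nat) (hk : k % 2 = 1) :
    pvOdd s (k + 1) = pvOdd s k * 10 + s.getD k 0 := by
  unfold pvOdd
  rw [List.range_succ, List.map_append, List.sum_append]
  have h1 : (List.range k).map (fun i => if i % 2 = 1 then s.getD i 0 * 10 ^ ((k + 1 - 1 - i) / 2) else 0)
      = (List.range k).map (fun i => (if i % 2 = 1 then s.getD i 0 * 10 ^ ((k - 1 - i) / 2) else 0) * 10) := by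
    apply List.map_congr_left
    intro i hi
    have hik : i < k := List.mem_range.mp hi
    by_cases h : i % 2 = 1
    · have h2 : (k + 1 - 1 - i) / 2 = (k - 1 - i) / 2 + 1 := by omega
      rw [if_pos h, if_pos h, h2, pow_succ]; ring
    · simp [h]
  rw [h1, List.sum_map_mul_right]
  simp [hk]

lemma pvFoldA (s : List Int) (k : Nat) :
    (List.range k).foldl (pvStepA s) (0, 0) = (pvEven s k, pvOdd s k) := by
  induction k with
  | zero => simp [pvEven, pvOdd]
  | succ k ih =>
    rw [List.range_succ, List.foldl_append, ih]
    rcases Nat.mod_two_eq_zero_or_one k with hk | hk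
    · simp [pvStepA, hk, pvEven_succ_even s k hk, pvOdd_succ_even s k hk]
    · simp [pvStepA, hk, pvEven_succ_odd s k hk, pvOdd_succ_odd s k hk]

lemma pvMain (s : List Int) (k : Nat) :
    pvEven s k + pvOdd s k
      = ((List.range k).map (fun i => s.getD i 0 * 10 ^ ((k - 1 - i) / 2))).sum := by
  unfold pvEven pvOdd
  rw [← PySem.List.sum_map_add_int]
  apply congrArg
  apply List.map_congr_left
  intro i _
  rcases Nat.mod_two_eq_zero_or_one i with h | h <;> simp [h]

lemma pvMod2 (i : Nat) : PySem.Int.mod (i : Int) 2 = ((i % 2 : Nat) : Int) := by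
  exact_mod_cast PySem.Int.mod_natCast i 2

lemma pvExp (k i : Nat) (h : i < k) :
    (PySem.Int.floordiv ((k : Int) - 1 - (i : Int)) 2).toNat = (k - 1 - i) / 2 := by
  have h1 : (k : Int) - 1 - (i : Int) = ((k - 1 - i : Nat) : Int) := by omega
  have h2 : PySem.Int.floordiv ((k - 1 - i : Nat) : Int) 2 = (((k - 1 - i) / 2 : Nat) : Int) := by
    exact_mod_cast PySem.Int.floordiv_natCast (k - 1 - i) 2
  rw [h1, h2, Int.toNat_natCast]

-- ===== VERDICT (by name: the statement is the Claim_ definition above) =====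
theorem MinSum_spec : Claim_equal_MinSum := by
  intro arr n _ _
  unfold Spec_MinSum MinSum MinSum_alt
  dsimp only
  set s := PySem.List.sorted arr (fun x => x) false with hs
  by_cases hn : 0 ≤ n
  · have hnk : n = ((n.toNat : Nat) : Int) := (Int.toNat_of_nonneg hn).symm
    set k := n.toNat with hk
    rw [hnk]
    rw [PySem.List.pyRange_one, List.foldl_map, List.foldl_map]
    simp only [Int.sub_zero, Int.toNat_natCast, zero_add]
    rw [PySem.List.foldl_congr_mem _ _ (pvStepA s) _ (by
      intro acc i hi
      simp only [pvStepA, pvMod2, PySem.List.pyGetD_natCast, Nat.cast_eq_zero])]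
    rw [PySem.List.foldl_congr_mem _ _
        (fun (t : Int) (i : Nat) => t + s.getD i 0 * 10 ^ ((k - 1 - i) / 2)) _ (by
      intro acc i hi
      rw [PySem.List.pyGetD_natCast, pvExp k i (List.mem_range.mp hi)])]
    rw [pvFoldA, PySem.List.foldl_add]
    simpa using pvMain s k
  · have hnil : PySem.List.pyRange 0 n 1 = [] :=
      PySem.List.pyRange_one_eq_nil (by omega)
    simp [hnil]
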